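-- pv_equiv track=rewrite | github.com/wlswodnd/pythonProjectwlswodnd | 6차시/6차 2급 4_initial_code.py | solution
-- ===== SOURCE A (Python) =====
-- def solution(cards):
--     #여기에 코드를 작성해주세요.
--     answer = 0
--     t = [0 for _ in range(3)]  # 0이 3개인 리스트
--     # t = 0
--     # a = 0
--     # for i in cards :
--     #     a += int(i)
--     #     if i == cards[i][0]:
--     #         t += 1
--     # if t == 3 :
--     #     answer = a * 3
--     # elif t == 2 :
--     #     answer = a * 2
--     # else:
--     #     answer = a
--     for card in cards :
--         if card[0] == "black" :
--             t[0] += 1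
--         elif card[0] == "blue" :
--             t[1] += 1
--         elif card[0] == "red":
--             t[2] += 1
--         answer += int(card[1])  # 카드의 숫자룰 answer 누적 더하기
--     if t[0] == 3 or t[1] == 3 or t[2] == 3 :
--         answer *= 3
--     elif t[0] == 2 or t[1] == 2 or t[2] == 2 :
--         answer *= 2
--         # "2" : 문자 2 : 숫자
--
--     return answer
-- ===== SOURCE B (Python) =====
-- def solution(cards):
--     total = sum(int(n) for _, n in cards)
--     colors = sorted(c for c, _ in cards if c in ("black", "blue", "red"))
--     best = 1
--     run = 0
--     prev = None
--     for c in colors + [None]: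
--         if c == prev:
--             run += 1
--         else:
--             if run == 3:
--                 best = 3
--             elif run == 2:
--                 best = max(best, 2)
--             run = 1
--             prev = c
--     return total * best
-- ===== Notes on version B (the rewrite author's own statement) =====
-- stated objective: alternative
-- what changed: B replaces A's single tally loop over a 3-slot count list by a sort-then-scan algorithm: it sums the numbers, sorts the relevant colors, and derives the bonus multiplier from the run lengths of the sorted list with a max-accumulator, returning total * best.
import Mathlib
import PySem

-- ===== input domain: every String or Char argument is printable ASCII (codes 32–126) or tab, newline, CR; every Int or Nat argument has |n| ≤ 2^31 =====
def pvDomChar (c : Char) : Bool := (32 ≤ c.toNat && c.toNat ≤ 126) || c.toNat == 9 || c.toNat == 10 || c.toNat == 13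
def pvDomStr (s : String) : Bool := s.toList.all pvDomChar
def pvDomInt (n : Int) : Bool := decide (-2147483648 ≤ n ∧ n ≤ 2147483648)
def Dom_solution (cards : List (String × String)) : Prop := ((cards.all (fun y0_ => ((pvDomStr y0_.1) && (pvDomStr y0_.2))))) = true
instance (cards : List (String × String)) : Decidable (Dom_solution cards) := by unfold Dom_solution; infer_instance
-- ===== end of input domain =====

-- B replaces A's tally loop by sort-then-scan: sort the relevant colors and derive the
-- bonus from run lengths of the sorted list (alternative algorithm, not claimed faster).

-- ===== PORT A =====
-- single loop over cards maintaining (answer, t0, t1, t2); int(card[1]) via PySem.Int.ofStr?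
def solution (cards : List (String × String)) : Int :=
  let st := cards.foldl
    (fun (p : Int × Int × Int × Int) card =>
      let t0 := if card.1 == "black" then p.2.1 + 1 else p.2.1
      let t1 := if card.1 == "black" then p.2.2.1 else if card.1 == "blue" then p.2.2.1 + 1 else p.2.2.1
      let t2 := if card.1 == "black" || card.1 == "blue" then p.2.2.2 else if card.1 == "red" then p.2.2.2 + 1 else p.2.2.2
      (p.1 + (PySem.Int.ofStr? card.2).getD 0, t0, t1, t2))
    (0, 0, 0, 0)
  if st.2.1 == 3 || st.2.2.1 == 3 || st.2.2.2 == 3 then st.1 * 3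
  else if st.2.1 == 2 || st.2.2.1 == 2 || st.2.2.2 == 2 then st.1 * 2
  else st.1

-- ===== PORT B =====
-- Source B's flush step: end of a run of length `run`; best = 3 on a run of 3, max best 2 on a run of 2
def bFlush (best run : Int) : Int :=
  if run == 3 then 3 else if run == 2 then max best 2 else best

-- Source B's loop body over colors + [None]; state = (best, run, prev)
def bStep (st : Int × Int × Option String) (c : Option String) : Int × Int × Option String :=
  if c == st.2.2 then (st.1, st.2.1 + 1, st.2.2)
  else (bFlush st.1 st.2.1, 1, c)

-- sum of numbers; sort the colors restricted to the three names; scan run lengths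
def solution_alt (cards : List (String × String)) : Int :=
  let total := (cards.map (fun c => (PySem.Int.ofStr? c.2).getD 0)).sum
  let colors := PySem.List.sorted
    (((cards.map Prod.fst).filter (fun c => c == "black" || c == "blue" || c == "red")))
    (fun x => x) false
  let best := ((colors.map some ++ [none]).foldl bStep (1, 0, none)).1
  total * best

-- ===== PRECONDITION & SPEC =====
-- Pre_ excludes exactly the inputs where int(card[1]) raises ValueError (in A and in B alike):
-- card[1] must be a Python int literal — optional surrounding whitespace, an optional sign,
-- then digits with single underscores only between digits.
def pvDigit (c : Char) : Bool := "0123456789".toList.contains c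

def pvDigitsTail : List Char → Bool
  | [] => true
  | ['_'] => false
  | '_' :: c :: cs => pvDigit c && pvDigitsTail cs
  | c :: cs => pvDigit c && pvDigitsTail cs

def pvIntBody : List Char → Bool
  | [] => false
  | c :: cs => pvDigit c && pvDigitsTail cs

def pvIntLike (s : String) : Bool :=
  match (PySem.Str.strip s).toList with
  | '+' :: cs => pvIntBody cs
  | '-' :: cs => pvIntBody cs
  | cs => pvIntBody cs

def Pre_solution (cards : List (String × String)) : Prop :=
  cards.all (fun c => pvIntLike c.2) = true
instance (cards : List (String × String)) : Decidable (Pre_solution cards) := by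
  unfold Pre_solution; infer_instance

def pvWitness_solution : (List (String × String)) :=
  [("black", "3"), ("blue", "-1"), ("black", "10")]

def Spec_solution (cards : List (String × String)) (out : Int) : Prop := out = solution_alt cards
instance (cards : List (String × String)) (out : Int) : Decidable (Spec_solution cards out) := by
  unfold Spec_solution; infer_instance

-- ===== CLAIM (what is proved, stated in full; the proofs are below) =====
def Claim_equal_solution : Prop := ∀ (cards : List (String × String)), Dom_solution cards → Pre_solution cards → Spec_solution cards (solution cards)

-- ===== LEMMAS AND PROOFS =====

theorem solution_fold (cards : List (String × String)) (a b c d : Int) :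
    cards.foldl
      (fun (p : Int × Int × Int × Int) card =>
        let t0 := if card.1 == "black" then p.2.1 + 1 else p.2.1
        let t1 := if card.1 == "black" then p.2.2.1 else if card.1 == "blue" then p.2.2.1 + 1 else p.2.2.1
        let t2 := if card.1 == "black" || card.1 == "blue" then p.2.2.2 else if card.1 == "red" then p.2.2.2 + 1 else p.2.2.2
        (p.1 + (PySem.Int.ofStr? card.2).getD 0, t0, t1, t2))
      (a, b, c, d)
    = (a + (cards.map (fun c => (PySem.Int.ofStr? c.2).getD 0)).sum,
       b + ((cards.countP (fun card => card.1 == "black")) : Int),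
       c + ((cards.countP (fun card => card.1 == "blue")) : Int),
       d + ((cards.countP (fun card => card.1 == "red")) : Int)) := by
  induction cards generalizing a b c d with
  | nil => simp
  | cons hd tl ih =>
    simp only [List.foldl_cons, List.map_cons, List.sum_cons, List.countP_cons, ih]
    by_cases h0 : hd.1 = "black" <;> by_cases h1 : hd.1 = "blue" <;> by_cases h2 : hd.1 = "red" <;>
      simp_all [Prod.ext_iff] <;> omega

-- the filtered color list is a permutation of the counts-canonical list
theorem filter_perm (cards : List (String × String)) :
    ((cards.map Prod.fst).filter (fun c => c == "black" || c == "blue" || c == "red")).Perm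
      (List.replicate (cards.countP (fun card => card.1 == "black")) "black" ++
       List.replicate (cards.countP (fun card => card.1 == "blue")) "blue" ++
       List.replicate (cards.countP (fun card => card.1 == "red")) "red") := by
  induction cards with
  | nil => simp
  | cons hd tl ih =>
    by_cases h0 : hd.1 = "black" <;> by_cases h1 : hd.1 = "blue" <;> by_cases h2 : hd.1 = "red" <;>
      simp_all [List.replicate_succ]
    · exact (ih.cons _).trans List.perm_middle.symm
    · exact (ih.cons _).trans
        (by simpa using (List.perm_middle (a := "red")
          (l₁ := List.replicate (tl.countP fun card => card.1 == "black") "black" ++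
                 List.replicate (tl.countP fun card => card.1 == "blue") "blue")
          (l₂ := List.replicate (tl.countP fun card => card.1 == "red") "red")).symm)

theorem canon_pairwise (b u r : Nat) :
    (List.replicate b "black" ++ List.replicate u "blue" ++ List.replicate r "red").Pairwise
      (fun x y : String => x ≤ y) := by
  have h1 : ("black" : String) ≤ "blue" := String.le_iff_toList_le.2 (by decide)
  have h2 : ("black" : String) ≤ "red" := String.le_iff_toList_le.2 (by decide)
  have h3 : ("blue" : String) ≤ "red" := String.le_iff_toList_le.2 (by decide)
  refine List.pairwise_append.2 ⟨List.pairwise_append.2 ⟨?_, ?_, ?_⟩, ?_, ?_⟩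
  · exact List.pairwise_replicate.2 (Or.inr le_rfl)
  · exact List.pairwise_replicate.2 (Or.inr le_rfl)
  · intro x hx y hy
    rw [List.eq_of_mem_replicate hx, List.eq_of_mem_replicate hy]; exact h1
  · exact List.pairwise_replicate.2 (Or.inr le_rfl)
  · intro x hx y hy
    rcases List.mem_append.1 hx with h | h <;>
      rw [List.eq_of_mem_replicate h, List.eq_of_mem_replicate hy] <;> assumption

theorem sorted_canon (cards : List (String × String)) :
    PySem.List.sorted
      ((cards.map Prod.fst).filter (fun c => c == "black" || c == "blue" || c == "red"))
      (fun x => x) false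
    = List.replicate (cards.countP (fun card => card.1 == "black")) "black" ++
      List.replicate (cards.countP (fun card => card.1 == "blue")) "blue" ++
      List.replicate (cards.countP (fun card => card.1 == "red")) "red" :=
  PySem.List.sorted_id_eq_of_perm_of_pairwise _ _ (filter_perm cards).symm (canon_pairwise _ _ _)

-- scanning a run of equal colors only increments the run counter
theorem bStep_same (m : Nat) (best run : Int) (c : String) :
    (List.replicate m (some c)).foldl bStep (best, run, some c) = (best, run + (m : Int), some c) := by
  induction m generalizing run with
  | zero => simp
  | succ k ih => simp [List.replicate_succ, bStep, ih, Prod.ext_iff]; ring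

-- entering a fresh run: flush, then count the whole replicate block
theorem bStep_block (m : Nat) (best run : Int) (c : String) (prev : Option String)
    (h : some c ≠ prev) :
    (List.replicate (m + 1) (some c)).foldl bStep (best, run, prev)
      = (bFlush best run, 1 + (m : Int), some c) := by
  have hne : (some c == prev) = false := by simp [h]
  simp [List.replicate_succ, bStep, hne, bStep_same]

-- the run-length scan on the canonical sorted list, as a function of the three counts
theorem scan_canon (b u r : Nat) :
    ((((List.replicate b "black" ++ List.replicate u "blue" ++ List.replicate r "red").map some)
        ++ [none]).foldl bStep (1, 0, none)).1
    = (if b = 3 ∨ u = 3 ∨ r = 3 then (3 : Int) else if b = 2 ∨ u = 2 ∨ r = 2 then 2 else 1) := by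
  rcases b with _ | b' <;> rcases u with _ | u' <;> rcases r with _ | r' <;>
    simp only [List.map_append, List.map_replicate, List.replicate_zero, List.nil_append,
      List.append_nil, List.append_assoc, List.foldl_append] <;>
    simp [bStep, bFlush, bStep_block] <;>
    split_ifs <;> simp_all <;> omega

-- ===== VERDICT (by name: the statement is the Claim_ definition above) =====
theorem solution_spec : Claim_equal_solution := by
  intro cards _ _
  unfold Spec_solution solution solution_alt
  simp only [solution_fold, sorted_canon]
  simp only [scan_canon, zero_add, Bool.or_eq_true, beq_iff_eq]
  split_ifs <;> omega
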